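-- pv_equiv track=rewrite | github.com/artyomrb/labs-python | darts3000.py | maxSumMass
-- ===== SOURCE A (Python) =====
-- def maxSumMass(mass_point,K):
--     N = len(mass_point)
--     max_number = 0
--     max_point = 0
--
--     if mass_point[K] < 0:
--         max_number = max(mass_point)
--
--     for i in range(0,N):
--         if (K >=  0) and (K >= i):
--             max_point = 0
--         else:
--             max_point = max_point + mass_point[i]
--         if max_point < 0:
--             max_point = 0
--         if max_number < max_point:
--             max_number = max_point
--     return max_number
-- ===== SOURCE B (Python) =====
-- def maxSumMass(mass_point, K):
--     seed = max(mass_point) if mass_point[K] < 0 else 0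
--     start = K + 1 if K >= 0 else 0
--     s = 0
--     running_min = 0
--     best = 0
--     for x in mass_point[start:]:
--         s += x
--         if s - running_min > best:
--             best = s - running_min
--         if s < running_min:
--             running_min = s
--     return max(seed, best)
-- ===== Notes on version B (the rewrite author's own statement) =====
-- stated objective: alternative
-- what changed: Replaces Kadane's reset loop over all indices (with the per-index K-guard) by a prefix-sum pass over the suffix mass_point[K+1:]: B tracks the running sum and its running minimum and takes best = max(s - running_min), combining with the seed max(mass_point) at the end.
import Mathlib
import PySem

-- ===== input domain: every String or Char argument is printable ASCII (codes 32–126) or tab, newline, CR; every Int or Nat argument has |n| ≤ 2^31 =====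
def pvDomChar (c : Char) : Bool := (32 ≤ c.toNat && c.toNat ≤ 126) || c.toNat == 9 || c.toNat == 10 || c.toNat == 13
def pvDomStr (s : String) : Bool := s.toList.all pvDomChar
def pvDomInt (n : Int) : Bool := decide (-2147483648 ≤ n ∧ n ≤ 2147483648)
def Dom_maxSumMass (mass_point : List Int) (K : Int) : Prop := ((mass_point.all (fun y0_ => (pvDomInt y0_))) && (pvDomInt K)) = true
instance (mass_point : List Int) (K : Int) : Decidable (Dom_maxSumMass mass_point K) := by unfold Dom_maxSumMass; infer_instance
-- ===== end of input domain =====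

-- B replaces A's Kadane reset loop (with per-index K-guard) by a prefix-sum / running-minimum
-- pass over the suffix mass_point[K+1:] (alternative decomposition, same cost).


-- ===== PORT A =====
-- one iteration of A's for-loop: state (max_number, max_point), loop index i
def pvStepA (mass_point : List Int) (K : Int) (st : Int × Int) (i : Int) : Int × Int :=
  let max_point := if K ≥ 0 ∧ K ≥ i then 0 else st.2 + PySem.List.pyGetD mass_point i 0
  let max_point := if max_point < 0 then 0 else max_point
  let max_number := if st.1 < max_point then max_point else st.1
  (max_number, max_point)

def maxSumMass (mass_point : List Int) (K : Int) : Int :=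
  let N : Int := mass_point.length
  -- mass_point[K]: Python raises IndexError out of range (excluded by Pre_); pyGetD is exact inside Pre_
  let max_number : Int :=
    if PySem.List.pyGetD mass_point K 0 < 0 then (PySem.List.max? mass_point id).getD 0 else 0
  ((PySem.List.pyRange 0 N 1).foldl (pvStepA mass_point K) (max_number, 0)).1

-- ===== PORT B =====
-- one iteration of B's for-loop: state (s, running_min, best), element x
def pvStepB (st : Int × Int × Int) (x : Int) : Int × Int × Int :=
  let s := st.1 + x
  let best := if s - st.2.1 > st.2.2 then s - st.2.1 else st.2.2
  let running_min := if s < st.2.1 then s else st.2.1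
  (s, running_min, best)

def maxSumMass_alt (mass_point : List Int) (K : Int) : Int :=
  let seed : Int :=
    if PySem.List.pyGetD mass_point K 0 < 0 then (PySem.List.max? mass_point id).getD 0 else 0
  let start : Int := if K ≥ 0 then K + 1 else 0
  let st := (PySem.List.slice mass_point (some start) none).foldl pvStepB (0, 0, 0)
  max seed st.2.2

-- ===== PRECONDITION & SPEC =====
-- Pre_ excludes exactly the inputs where mass_point[K] raises IndexError (K out of range, with
-- Python's negative-index wraparound); both A and B raise there.
def Pre_maxSumMass (mass_point : List Int) (K : Int) : Prop :=
  -(mass_point.length : Int) ≤ K ∧ K < (mass_point.length : Int)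
instance (mass_point : List Int) (K : Int) : Decidable (Pre_maxSumMass mass_point K) := by
  unfold Pre_maxSumMass; infer_instance
def pvWitness_maxSumMass : List Int × Int := ([3, -1, 4, -2], 1)

def Spec_maxSumMass (mass_point : List Int) (K : Int) (out : Int) : Prop := out = maxSumMass_alt mass_point K
instance (mass_point : List Int) (K : Int) (out : Int) : Decidable (Spec_maxSumMass mass_point K out) := by unfold Spec_maxSumMass; infer_instance

-- ===== CLAIM (what is proved, stated in full; the proofs are below) =====
def Claim_equal_maxSumMass : Prop := ∀ (mass_point : List Int) (K : Int), Dom_maxSumMass mass_point K → Pre_maxSumMass mass_point K → Spec_maxSumMass mass_point K (maxSumMass mass_point K)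

-- ===== LEMMAS AND PROOFS =====

-- A's loop body, on indices past K, is a pure Kadane step on the element
def pvKStep (st : Int × Int) (x : Int) : Int × Int :=
  let p := if st.2 + x < 0 then 0 else st.2 + x
  (if st.1 < p then p else st.1, p)

lemma pvStepA_eq_kstep (mp : List Int) (K i : Int) (st : Int × Int)
    (h : ¬ (K ≥ 0 ∧ K ≥ i)) :
    pvStepA mp K st i = pvKStep st (PySem.List.pyGetD mp i 0) := by
  simp [pvStepA, pvKStep, h]

-- the Kadane fold against B's prefix-sum fold: invariant (mn, pt) = (max c best, s - running_min)
lemma kadane_vs_prefix (xs : List Int) : ∀ (c s rm best : Int), 0 ≤ best →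
    (xs.foldl pvKStep (max c best, s - rm)).1 = max c ((xs.foldl pvStepB (s, rm, best)).2.2)
    ∧ 0 ≤ (xs.foldl pvStepB (s, rm, best)).2.2 := by
  induction xs with
  | nil => intro c s rm best h; exact ⟨rfl, h⟩
  | cons x xs ih =>
    intro c s rm best h
    have h1 : pvKStep (max c best, s - rm) x
        = (max c (max best (s + x - rm)), (s + x) - min rm (s + x)) := by
      simp [pvKStep, Prod.ext_iff, max_def, min_def]
      split_ifs <;> omega
    have h2 : pvStepB (s, rm, best) x = (s + x, min rm (s + x), max best (s + x - rm)) := by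
      simp [pvStepB, Prod.ext_iff, max_def, min_def]
      split_ifs <;> omega
    simp only [List.foldl_cons, h1, h2]
    exact ih c (s + x) (min rm (s + x)) (max best (s + x - rm)) (by omega)

-- a Kadane step from max_point = 0 cannot see a negative max_number
lemma kstep_clamp (mn x : Int) : pvKStep (mn, 0) x = pvKStep (max mn 0, 0) x := by
  simp [pvKStep, Prod.ext_iff, max_def]
  split_ifs <;> omega

-- the Kadane fold over a NONEMPTY list from (c, 0) against B's fold from (0, 0, 0)
lemma kadane_vs_prefix_cons (y : Int) (xs : List Int) (c : Int) :
    ((y :: xs).foldl pvKStep (c, 0)).1 = max c (((y :: xs).foldl pvStepB (0, 0, 0)).2.2) := by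
  rw [List.foldl_cons, List.foldl_cons, kstep_clamp]
  have h1 : pvKStep (max c 0, 0) y = (max c (max 0 (0 + y - 0)), (0 + y) - min 0 (0 + y)) := by
    simp [pvKStep, Prod.ext_iff, max_def, min_def]
    split_ifs <;> omega
  have h2 : pvStepB (0, 0, 0) y = (0 + y, min 0 (0 + y), max 0 (0 + y - 0)) := by
    simp [pvStepB, Prod.ext_iff, max_def, min_def]
    split_ifs <;> omega
  rw [h1, h2]
  exact (kadane_vs_prefix xs c (0 + y) (min 0 (0 + y)) (max 0 (0 + y - 0)) (by omega)).1

-- phase 1 (K ≥ 0, indices i ≤ K): the state (c, 0), c ≥ 0, is fixed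
lemma phase1_fix (mp : List Int) (K : Int) :
    ∀ (l : List Int) (c : Int), (∀ i ∈ l, K ≥ 0 ∧ K ≥ i) → 0 ≤ c →
      l.foldl (pvStepA mp K) (c, 0) = (c, 0) := by
  intro l
  induction l with
  | nil => intro c _ _; rfl
  | cons i l ih =>
    intro c hall hc
    have hi := hall i (List.mem_cons_self ..)
    have hstep : pvStepA mp K (c, 0) i = (c, 0) := by
      simp [pvStepA, if_pos hi, Prod.ext_iff]
      omega
    simp only [List.foldl_cons, hstep]
    exact ih c (fun j hj => hall j (List.mem_cons_of_mem _ hj)) hc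

-- the tail of A's loop (indices start..N-1, all past K) equals the Kadane fold over the suffix
lemma tailA_eq_kadane (mp : List Int) (K start : Int) (init : Int × Int)
    (h0 : 0 ≤ start) (hK : K < start) :
    (PySem.List.pyRange start (mp.length : Int) 1).foldl (pvStepA mp K) init
      = (mp.drop start.toNat).foldl pvKStep init := by
  rw [PySem.List.foldl_congr_mem _ _ (fun st i => pvKStep st (PySem.List.pyGetD mp i 0)) init
      (by
        intro st i hi
        have := (PySem.List.mem_pyRange_one).1 hi
        exact pvStepA_eq_kstep mp K i st (by omega))]
  exact PySem.List.foldl_pyRange_pyGetD' mp 0 pvKStep init h0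

-- ===== VERDICT (by name: the statement is the Claim_ definition above) =====
theorem maxSumMass_spec : Claim_equal_maxSumMass := by
  intro mp K _ hpre
  obtain ⟨hlo, hhi⟩ := hpre
  have hN : 1 ≤ (mp.length : Int) := by omega
  unfold Spec_maxSumMass
  show maxSumMass mp K = maxSumMass_alt mp K
  simp only [maxSumMass, maxSumMass_alt]
  set seed : Int :=
    if PySem.List.pyGetD mp K 0 < 0 then (PySem.List.max? mp id).getD 0 else 0 with hseed
  by_cases hK : K ≥ 0
  · -- start = K + 1; split the range at K+1, phase 1 fixes the state at (max seed 0, 0)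
    rw [if_pos hK, PySem.List.slice_from mp (show (0:Int) ≤ K + 1 by omega)]
    have hsplit : PySem.List.pyRange 0 (mp.length : Int) 1
        = PySem.List.pyRange 0 (K + 1) 1 ++ PySem.List.pyRange (K + 1) (mp.length : Int) 1 :=
      PySem.List.pyRange_one_append 0 (K + 1) _ (by omega) (by omega)
    have hcons : PySem.List.pyRange 0 (K + 1) 1 = 0 :: PySem.List.pyRange 1 (K + 1) 1 :=
      PySem.List.pyRange_one_cons (by omega)
    have hfirst : pvStepA mp K (seed, 0) 0 = (max seed 0, 0) := by
      simp [pvStepA, hK, Prod.ext_iff, max_def]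
      split_ifs <;> omega
    have hphase1 : (PySem.List.pyRange 1 (K + 1) 1).foldl (pvStepA mp K) (max seed 0, 0)
        = (max seed 0, 0) := by
      refine phase1_fix mp K _ _ (fun i hi => ?_) (le_max_right _ _)
      have := (PySem.List.mem_pyRange_one).1 hi
      exact ⟨hK, by omega⟩
    rw [hsplit, List.foldl_append, hcons, List.foldl_cons, hfirst, hphase1,
        tailA_eq_kadane mp K (K + 1) _ (by omega) (by omega)]
    have hmain := (kadane_vs_prefix (mp.drop (K + 1).toNat) seed 0 0 0 le_rfl).1
    simp only [sub_zero] at hmain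
    exact hmain
  · -- start = 0; the whole loop is the Kadane fold over mp, which is nonempty
    rw [if_neg hK, PySem.List.slice_from mp (le_refl (0:Int)),
        tailA_eq_kadane mp K 0 _ le_rfl (by omega)]
    simp only [Int.toNat_zero, List.drop_zero]
    obtain ⟨y, ys, rfl⟩ : ∃ y ys, mp = y :: ys := by
      cases mp with
      | nil => simp at hN
      | cons y ys => exact ⟨y, ys, rfl⟩
    exact kadane_vs_prefix_cons y ys seed
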